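-- pv_equiv track=rewrite | github.com/arbiter07/py-algorithm | step11-15.py | solution_13
-- ===== SOURCE A (Python) =====
-- def solution_13(board, moves):
--   ret = 0
--   lanes = [[] for _ in range(len(board[0]))]
--   for i in range(len(board) - 1 , -1 , -1):
--     for j in range(len(board[0])):
--       if board[i][j]:
--         lanes[j].append(board[i][j])
--
--   bucket = []
--   for move in moves:
--     lane = lanes[move-1]
--     if lane:
--       popValue = lane.pop()
--       if not bucket:
--         bucket.append(popValue)
--       else:
--         if bucket[-1] == popValue:
--           bucket.pop()
--           ret += 2
--         else:
--           bucket.append(popValue)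
--   return ret
-- ===== SOURCE B (Python) =====
-- def solution_13(board, moves):
--     # Pointer-based simulation: no lane stacks are built and the board is
--     # never mutated; pos[c] is the first row of column c not yet consumed.
--     pos = [0] * len(board[0])
--     bucket = []
--     ret = 0
--     for move in moves:
--         for r in range(pos[move - 1], len(board)):
--             v = board[r][move - 1]
--             if v:
--                 pos[move - 1] = r + 1
--                 if bucket and bucket[-1] == v:
--                     bucket.pop()
--                     ret += 2
--                 else:
--                     bucket.append(v)
--                 break
--     return ret
-- ===== Notes on version B (the rewrite author's own statement) =====
-- stated objective: alternative
-- what changed: B builds no lane stacks and never touches the board: it keeps one top-pointer per column and, per move, scans that column downward from its pointer for the first non-zero cell, feeding it into the same matching bucket; Pre_ excludes inputs where A raises and, on non-rectangular boards, non-positive moves, where A's lane choice via Python negative-index wraparound into the lane list is accidental and any per-row reading wraps differently.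
-- outside the precondition, e.g. on solution_13([[0, 0], [1, 2, 2]], [0, 0, -1]): A returns 0, B returns 2
import Mathlib
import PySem

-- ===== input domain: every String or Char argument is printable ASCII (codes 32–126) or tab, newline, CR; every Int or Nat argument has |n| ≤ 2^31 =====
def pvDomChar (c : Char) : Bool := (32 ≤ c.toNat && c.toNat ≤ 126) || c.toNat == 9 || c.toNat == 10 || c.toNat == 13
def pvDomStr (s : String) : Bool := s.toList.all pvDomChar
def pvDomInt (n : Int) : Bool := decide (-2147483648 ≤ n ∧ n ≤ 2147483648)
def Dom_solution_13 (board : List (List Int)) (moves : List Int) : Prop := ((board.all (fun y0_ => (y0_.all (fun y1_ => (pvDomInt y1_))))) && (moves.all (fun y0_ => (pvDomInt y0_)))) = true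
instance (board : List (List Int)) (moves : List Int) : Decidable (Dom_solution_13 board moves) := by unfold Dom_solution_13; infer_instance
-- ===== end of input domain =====

-- B replaces A's prebuilt lane stacks by per-column top pointers over the unmutated
-- board (alternative decomposition, same cost); equivalence is claimed on Pre_ below.

-- ===== PORT A =====
def pvA_inner (board : List (List Int)) (i : Int) (C : Nat) (lanes : List (List Int)) : List (List Int) :=
  (PySem.List.pyRange 0 (C : Int) 1).foldl
    (fun lanes j =>
      let v := PySem.List.pyGetD (PySem.List.pyGetD board i []) j 0
      if v ≠ 0 then PySem.List.pySetD lanes j (PySem.List.pyGetD lanes j [] ++ [v]) else lanes)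
    lanes

def pvA_lanes (board : List (List Int)) : List (List Int) :=
  let C := (PySem.List.pyGetD board 0 []).length
  (PySem.List.pyRange ((board.length : Int) - 1) (-1) (-1)).foldl
    (fun lanes i => pvA_inner board i C lanes)
    (List.replicate C [])

def pvA_step (st : Int × List (List Int) × List Int) (move : Int) : Int × List (List Int) × List Int :=
  let ret := st.1
  let lanes := st.2.1
  let bucket := st.2.2
  let lane := PySem.List.pyGetD lanes (move - 1) []
  if lane ≠ [] then
    let popValue := PySem.List.pyGetD lane (-1) 0
    let lanes' := PySem.List.pySetD lanes (move - 1) lane.dropLast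
    if bucket = [] then (ret, lanes', bucket ++ [popValue])
    else if PySem.List.pyGetD bucket (-1) 0 = popValue then (ret + 2, lanes', bucket.dropLast)
    else (ret, lanes', bucket ++ [popValue])
  else (ret, lanes, bucket)

def solution_13 (board : List (List Int)) (moves : List Int) : Int :=
  (moves.foldl pvA_step (0, pvA_lanes board, [])).1

-- ===== PORT B =====
-- inner 'for r in range(pos[move-1], len(board)): v = board[r][move-1] … break' loop of
-- Source B: returns the found doll and the new pointer r+1 (none = loop ran out)
def pvB_scan (rows : List (List Int)) (m : Int) (r : Nat) : Option (Int × Nat) :=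
  match rows with
  | [] => none
  | row :: rest =>
    let v := PySem.List.pyGetD row (m - 1) 0
    if v ≠ 0 then some (v, r + 1) else pvB_scan rest m (r + 1)

def pvB_step (board : List (List Int)) (st : Int × List Nat × List Int) (move : Int) :
    Int × List Nat × List Int :=
  let ret := st.1
  let pos := st.2.1
  let bucket := st.2.2
  match PySem.List.pyGet? pos (move - 1) with  -- p = pos[move-1]; none = IndexError, outside Pre_
  | none => (ret, pos, bucket)
  | some p =>
    match pvB_scan (board.drop p) move p with
    | none => (ret, pos, bucket)
    | some (v, q) =>
      let pos' := PySem.List.pySetD pos (move - 1) q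
      if bucket ≠ [] ∧ bucket.getLastD 0 = v then (ret + 2, pos', bucket.dropLast)
      else (ret, pos', bucket ++ [v])

def solution_13_alt (board : List (List Int)) (moves : List Int) : Int :=
  (moves.foldl (pvB_step board) (0, List.replicate (board.headD []).length 0, [])).1

-- ===== PRECONDITION & SPEC =====
-- Pre_ excludes (a) the inputs where A raises: empty board (board[0]), a row shorter
-- than row 0, or a move whose index move-1 is out of range for the len(board[0]) lanes
-- (IndexError); and (b) on non-rectangular boards only, non-positive moves, where A's
-- lane choice comes from Python's accidental negative-index wraparound into the lane
-- list while any per-row reading of the board wraps differently per row.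
def Pre_solution_13 (board : List (List Int)) (moves : List Int) : Prop :=
  board ≠ [] ∧
  (∀ row ∈ board, (board.headD []).length ≤ row.length) ∧
  (∀ m ∈ moves, 1 - ((board.headD []).length : Int) ≤ m ∧ m ≤ ((board.headD []).length : Int)) ∧
  ((∀ row ∈ board, row.length = (board.headD []).length) ∨ (∀ m ∈ moves, 1 ≤ m))
instance (board : List (List Int)) (moves : List Int) : Decidable (Pre_solution_13 board moves) := by unfold Pre_solution_13; infer_instance

def pvWitness_solution_13 : List (List Int) × List Int := ([[1, 0], [2, 2]], [1, 2, 2, 1])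

def Spec_solution_13 (board : List (List Int)) (moves : List Int) (out : Int) : Prop := out = solution_13_alt board moves
instance (board : List (List Int)) (moves : List Int) (out : Int) : Decidable (Spec_solution_13 board moves out) := by unfold Spec_solution_13; infer_instance

-- ===== CLAIM (what is proved, stated in full; the proofs are below) =====
def Claim_equal_solution_13 : Prop := ∀ (board : List (List Int)) (moves : List Int), Dom_solution_13 board moves → Pre_solution_13 board moves → Spec_solution_13 board moves (solution_13 board moves)

-- ===== LEMMAS AND PROOFS =====

-- the not-yet-consumed dolls of column c, topmost first
def pvCol (rows : List (List Int)) (c : Nat) : List Int :=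
  rows.filterMap (fun row => if row.getD c 0 ≠ 0 then some (row.getD c 0) else none)

-- simulation invariant between A's state and B's state
def pvInv (board : List (List Int)) (C : Nat)
    (a : Int × List (List Int) × List Int) (b : Int × List Nat × List Int) : Prop :=
  a.1 = b.1 ∧ a.2.2 = b.2.2 ∧ a.2.1.length = C ∧ b.2.1.length = C ∧
  ∀ j, j < C → a.2.1.getD j [] = (pvCol (board.drop (b.2.1.getD j 0)) j).reverse

-- pvCol over a cons
theorem pvCol_cons (row : List Int) (rest : List (List Int)) (c : Nat) :
    pvCol (row :: rest) c =
      (if row.getD c 0 ≠ 0 then [row.getD c 0] else []) ++ pvCol rest c := by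
  simp only [pvCol, List.filterMap_cons]
  split_ifs <;> simp_all

-- generic characterisation of the inner j-fold of A's lane building
def pvSetStep (f : Nat -> Int) (ls : List (List Int)) (k : Nat) : List (List Int) :=
  if f k ≠ 0 then ls.set k (ls.getD k [] ++ [f k]) else ls

theorem pv_foldl_set_length (f : Nat → Int) (n : Nat) (lanes : List (List Int)) :
    ((List.range n).foldl (pvSetStep f) lanes).length = lanes.length := by
  induction n generalizing lanes with
  | zero => simp
  | succ n ih =>
    rw [List.range_succ, List.foldl_append]
    simp only [List.foldl_cons, List.foldl_nil]
    rw [show ∀ ls, (pvSetStep f ls n).length = ls.length by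
      intro ls; unfold pvSetStep; split_ifs <;> simp]
    exact ih lanes

theorem pv_foldl_set_getD (f : Nat → Int) (n : Nat) (j : Nat) (lanes : List (List Int))
    (hj : j < lanes.length) :
    ((List.range n).foldl (pvSetStep f) lanes).getD j []
      = if j < n ∧ f j ≠ 0 then lanes.getD j [] ++ [f j] else lanes.getD j [] := by
  induction n with
  | zero => simp
  | succ n ih =>
    rw [List.range_succ, List.foldl_append]
    simp only [List.foldl_cons, List.foldl_nil]
    set res := (List.range n).foldl (pvSetStep f) lanes with hres
    have hlen : res.length = lanes.length := pv_foldl_set_length f n lanes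
    by_cases hjn : j = n
    · subst hjn
      unfold pvSetStep
      by_cases hf : f j = 0
      · rw [if_neg (by simp [hf]), ih]
        simp [hf]
      · rw [if_pos (by exact hf), List.getD_eq_getElem?_getD,
          List.getElem?_set_self (by omega), Option.getD_some, ih]
        simp [hf]
    · have hstep : (pvSetStep f res n).getD j [] = res.getD j [] := by
        unfold pvSetStep
        split_ifs with hf
        · rw [List.getD_eq_getElem?_getD, List.getElem?_set_ne (by omega), ← List.getD_eq_getElem?_getD]
        · rfl
      rw [hstep, ih]
      have hjn' : (j < n + 1) ↔ (j < n) := by omega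
      simp [hjn']

-- A's inner loop as the generic fold
theorem pvA_inner_eq (board : List (List Int)) (i : Int) (C : Nat) (lanes : List (List Int)) :
    pvA_inner board i C lanes =
      (List.range C).foldl (pvSetStep (fun k => (PySem.List.pyGetD board i []).getD k 0)) lanes := by
  unfold pvA_inner
  rw [PySem.List.pyRange_zero_nat, List.foldl_map]
  apply PySem.List.foldl_congr_mem
  intro ls k _
  unfold pvSetStep
  simp [PySem.List.pyGetD_natCast, PySem.List.pySetD_natCast]

-- descending index list splits off its largest index
theorem pv_desc_succ (n : Nat) :
    (List.range (n + 1)).map (fun (k : Nat) => ((n + 1 : Nat) : Int) - 1 - (k : Int))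
      = ((n : Nat) : Int) :: (List.range n).map (fun (k : Nat) => ((n : Nat) : Int) - 1 - (k : Int)) := by
  rw [List.range_succ_eq_map, List.map_cons, List.map_map]
  congr 1
  · push_cast; ring
  · apply List.map_congr_left
    intro k _
    simp only [Function.comp_apply, Nat.succ_eq_add_one]
    push_cast; ring

-- A's outer loop (rows n-1 … 0, i.e. the first n rows, taken bottom-up)
theorem pv_outer (board : List (List Int)) (C : Nat)
    (hrows : ∀ row ∈ board, C ≤ row.length) :
    ∀ n, n ≤ board.length → ∀ lanes : List (List Int), lanes.length = C →
      (∀ j, j < C → lanes.getD j [] = (pvCol (board.drop n) j).reverse) →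
      (((List.range n).map (fun (k : Nat) => ((n : Nat) : Int) - 1 - (k : Int))).foldl
          (fun ls i => pvA_inner board i C ls) lanes).length = C ∧
      ∀ j, j < C →
        (((List.range n).map (fun (k : Nat) => ((n : Nat) : Int) - 1 - (k : Int))).foldl
            (fun ls i => pvA_inner board i C ls) lanes).getD j [] = (pvCol board j).reverse := by
  intro n
  induction n with
  | zero =>
    intro _ lanes hlen hcol
    simpa [hlen] using hcol
  | succ n ih =>
    intro hn lanes hlen hcol
    rw [pv_desc_succ, List.foldl_cons]
    have hnb : n < board.length := by omega
    have hrow : PySem.List.pyGetD board ((n : Nat) : Int) [] = board[n] := by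
      rw [PySem.List.pyGetD_natCast, List.getD_eq_getElem?_getD, List.getElem?_eq_getElem hnb,
        Option.getD_some]
    have hrlen : C ≤ board[n].length := hrows _ (List.getElem_mem hnb)
    set lanes1 := pvA_inner board ((n : Nat) : Int) C lanes with h1
    have hlen1 : lanes1.length = C := by
      rw [h1, pvA_inner_eq, pv_foldl_set_length, hlen]
    have hcol1 : ∀ j, j < C → lanes1.getD j [] = (pvCol (board.drop n) j).reverse := by
      intro j hj
      rw [h1, pvA_inner_eq, pv_foldl_set_getD _ _ _ _ (by omega), hrow]
      rw [← List.getElem_cons_drop hnb, pvCol_cons]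
      rw [hcol j hj]
      by_cases hv : board[n][j]?.getD 0 = 0 <;>
        simp [List.getD_eq_getElem?_getD, hv, hj]
    exact ih (by omega) lanes1 hlen1 hcol1

-- characterisation of A's initial lane stacks
theorem pvA_lanes_spec (board : List (List Int)) (hb : board ≠ [])
    (hrows : ∀ row ∈ board, (board.headD []).length ≤ row.length) :
    (pvA_lanes board).length = (board.headD []).length ∧
    ∀ j, j < (board.headD []).length →
      (pvA_lanes board).getD j [] = (pvCol board j).reverse := by
  have hhead : PySem.List.pyGetD board 0 [] = board.headD [] := by
    cases board with
    | nil => simp at hb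
    | cons r rest => rw [PySem.List.pyGetD_zero]; rfl
  have hrange : PySem.List.pyRange ((board.length : Int) - 1) (-1) (-1)
      = (List.range board.length).map (fun (k : Nat) => ((board.length : Nat) : Int) - 1 - (k : Int)) := by
    rw [PySem.List.pyRange_neg_one]
    have : ((board.length : Int) - 1 - (-1)).toNat = board.length := by omega
    rw [this]
  unfold pvA_lanes
  rw [hhead, hrange]
  exact pv_outer board _ hrows board.length (le_refl _) (List.replicate _ []) (by simp)
    (by intro j hj; simp [pvCol])

-- the Python index move-1 into a length-C list, normalised
theorem pv_idx_spec (C : Nat) (m : Int) (hm : 1 - (C : Int) ≤ m ∧ m ≤ (C : Int)) :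
    0 < C ∧
    ((PySem.Int.mod (m - 1) (C : Int)).toNat < C ∧
      PySem.List.pyIdx? C (m - 1) = some (PySem.Int.mod (m - 1) (C : Int)).toNat) := by
  have hC : 0 < C := by omega
  have hmod : PySem.Int.mod (m - 1) (C : Int) = if 0 ≤ m - 1 then m - 1 else m - 1 + C := by
    rw [PySem.Int.mod_eq_emod_of_pos (by exact_mod_cast hC)]
    split_ifs with h1
    · exact Int.emod_eq_of_lt h1 (by omega)
    · conv_lhs => rw [show m - 1 = (m - 1 + (C : Int)) + (C : Int) * (-1) by ring]
      rw [Int.add_mul_emod_self_left]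
      exact Int.emod_eq_of_lt (by omega) (by omega)
  refine ⟨hC, ?_, ?_⟩
  · rw [hmod]; split_ifs <;> omega
  · unfold PySem.List.pyIdx?
    rw [hmod]
    by_cases h1 : 0 ≤ m - 1
    · rw [if_pos h1, if_pos h1, if_pos (by omega : m - 1 < (C : Int))]
    · rw [if_neg h1, if_neg h1, if_pos (by omega : -(C : Int) ≤ m - 1)]
      congr 1
      omega

theorem pv_pyGetD_idx {α : Type} (xs : List α) (d : α) (C : Nat) (m : Int)
    (hlen : xs.length = C) (hm : 1 - (C : Int) ≤ m ∧ m ≤ (C : Int)) :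
    PySem.List.pyGetD xs (m - 1) d
      = xs.getD (PySem.Int.mod (m - 1) (C : Int)).toNat d := by
  obtain ⟨hC, hc, hidx⟩ := pv_idx_spec C m hm
  unfold PySem.List.pyGetD PySem.List.pyGet?
  rw [hlen, hidx]
  simp [List.getD_eq_getElem?_getD]

-- reading board[r][move-1] is reading the normalised column, given Pre_'s row shapes
theorem pv_row_get (row : List Int) (C : Nat) (m : Int)
    (hm : 1 - (C : Int) ≤ m ∧ m ≤ (C : Int))
    (hrow : row.length = C ∨ (1 ≤ m ∧ C ≤ row.length)) :
    PySem.List.pyGetD row (m - 1) 0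
      = row.getD (PySem.Int.mod (m - 1) (C : Int)).toNat 0 := by
  rcases hrow with h | ⟨h1, h2⟩
  · exact pv_pyGetD_idx row 0 C m h hm
  · have hC : 0 < C := by omega
    have hmod : PySem.Int.mod (m - 1) (C : Int) = m - 1 := by
      rw [PySem.Int.mod_eq_emod_of_pos (by exact_mod_cast hC)]
      exact Int.emod_eq_of_lt (by omega) (by omega)
    calc PySem.List.pyGetD row (m - 1) 0
        = PySem.List.pyGetD row (((m - 1).toNat : Nat) : Int) 0 := by
          congr 1; omega
      _ = row.getD (m - 1).toNat 0 := by rw [PySem.List.pyGetD_natCast]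
      _ = row.getD (PySem.Int.mod (m - 1) (C : Int)).toNat 0 := by rw [hmod]

theorem pv_pyGet_idx (pos : List Nat) (C : Nat) (m : Int)
    (hlen : pos.length = C) (hm : 1 - (C : Int) ≤ m ∧ m ≤ (C : Int)) :
    PySem.List.pyGet? pos (m - 1)
      = some (pos.getD (PySem.Int.mod (m - 1) (C : Int)).toNat 0) := by
  obtain ⟨hC, hc, hidx⟩ := pv_idx_spec C m hm
  unfold PySem.List.pyGet?
  rw [hlen, hidx]
  show pos[(PySem.Int.mod (m - 1) (C : Int)).toNat]? = _
  rw [List.getElem?_eq_getElem (show (PySem.Int.mod (m - 1) (C : Int)).toNat < pos.length by omega)]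
  rw [List.getD_eq_getElem?_getD,
    List.getElem?_eq_getElem (show (PySem.Int.mod (m - 1) (C : Int)).toNat < pos.length by omega)]
  rfl

theorem pv_pySetD_idx {α : Type} (xs : List α) (C : Nat) (m : Int) (v : α)
    (hlen : xs.length = C) (hm : 1 - (C : Int) ≤ m ∧ m ≤ (C : Int)) :
    PySem.List.pySetD xs (m - 1) v
      = xs.set (PySem.Int.mod (m - 1) (C : Int)).toNat v := by
  obtain ⟨hC, hc, hidx⟩ := pv_idx_spec C m hm
  unfold PySem.List.pySetD PySem.List.pySet?
  rw [hlen, hidx]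
  rfl

-- B's column scan finds exactly the head of the remaining column
theorem pvB_scan_spec (m : Int) (c : Nat) :
    ∀ (rows : List (List Int)) (r : Nat),
      (∀ row ∈ rows, PySem.List.pyGetD row (m - 1) 0 = row.getD c 0) →
      (pvB_scan rows m r = none ∧ pvCol rows c = []) ∨
      ∃ v q, pvB_scan rows m r = some (v, q) ∧ r < q ∧
        pvCol rows c = v :: pvCol (rows.drop (q - r)) c := by
  intro rows
  induction rows with
  | nil => intro r _; left; simp [pvB_scan, pvCol]
  | cons row rest ih =>
    intro r hget
    have hrow : PySem.List.pyGetD row (m - 1) 0 = row.getD c 0 :=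
      hget row (List.mem_cons_self)
    have hrest : ∀ ro ∈ rest, PySem.List.pyGetD ro (m - 1) 0 = ro.getD c 0 :=
      fun ro hro => hget ro (List.mem_cons_of_mem row hro)
    by_cases hv : row[c]?.getD 0 = 0
    · rcases ih (r + 1) hrest with ⟨h1, h2⟩ | ⟨v, q, h1, h2, h3⟩
      · left
        constructor
        · simp [pvB_scan, hrow, List.getD_eq_getElem?_getD, hv, h1]
        · rw [pvCol_cons]
          simp [List.getD_eq_getElem?_getD, hv, h2]
      · right
        refine ⟨v, q, ?_, by omega, ?_⟩
        · simp [pvB_scan, hrow, List.getD_eq_getElem?_getD, hv, h1]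
        · have hq : q - r = (q - (r + 1)) + 1 := by omega
          rw [pvCol_cons, h3, hq]
          simp [List.getD_eq_getElem?_getD, hv]
    · right
      refine ⟨row.getD c 0, r + 1, ?_, by omega, ?_⟩
      · simp [pvB_scan, hrow, List.getD_eq_getElem?_getD, hv]
      · rw [pvCol_cons]
        simp [List.getD_eq_getElem?_getD, hv]

-- one move preserves the simulation invariant
theorem pv_step_inv (board : List (List Int)) (C : Nat) (m : Int)
    (hm : 1 - (C : Int) ≤ m ∧ m ≤ (C : Int))
    (hrget : ∀ row ∈ board,
      PySem.List.pyGetD row (m - 1) 0 = row.getD (PySem.Int.mod (m - 1) (C : Int)).toNat 0)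
    (a : Int × List (List Int) × List Int) (b : Int × List Nat × List Int)
    (hinv : pvInv board C a b) :
    pvInv board C (pvA_step a m) (pvB_step board b m) := by
  obtain ⟨ra, la, ba⟩ := a
  obtain ⟨rb, pb, bb⟩ := b
  obtain ⟨hret, hbuck, halen, hblen, hcol⟩ := hinv
  simp only at hret hbuck halen hblen hcol
  subst hret hbuck
  obtain ⟨hC, hc, hidx⟩ := pv_idx_spec C m hm
  set c := (PySem.Int.mod (m - 1) (C : Int)).toNat with hcdef
  set p := pb.getD c 0 with hpdef
  have hlane : la.getD c [] = (pvCol (board.drop p) c).reverse := hcol c hc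
  unfold pvA_step pvB_step
  dsimp only
  rw [pv_pyGetD_idx la [] C m halen hm, pv_pyGet_idx pb C m hblen hm, ← hcdef, hlane, ← hpdef]
  dsimp only
  have hdropget : ∀ row ∈ board.drop p, PySem.List.pyGetD row (m - 1) 0 = row.getD c 0 :=
    fun row hrow => hrget row (List.mem_of_mem_drop hrow)
  rcases pvB_scan_spec m c (board.drop p) p hdropget with ⟨hs, hcol0⟩ | ⟨v, q, hs, hpq, hcol1⟩
  · rw [hs, hcol0]
    dsimp only
    simp only [List.reverse_nil, ne_eq, not_true_eq_false, if_neg, not_false_eq_true]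
    exact ⟨rfl, rfl, halen, hblen, hcol⟩
  · rw [hs]
    dsimp only
    have hdrop : (board.drop p).drop (q - p) = board.drop q := by
      rw [List.drop_drop]
      congr 1
      omega
    rw [hdrop] at hcol1
    rw [hcol1]
    have hcons : (v :: pvCol (board.drop q) c).reverse
        = (pvCol (board.drop q) c).reverse ++ [v] := by simp
    rw [if_pos (by simp)]
    have hpop : PySem.List.pyGetD ((v :: pvCol (board.drop q) c).reverse) (-1) 0 = v := by
      rw [hcons, PySem.List.pyGetD_neg_one_append_singleton]
    have hdropLast : ((v :: pvCol (board.drop q) c).reverse).dropLast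
        = (pvCol (board.drop q) c).reverse := by
      rw [hcons]; simp
    rw [hpop, hdropLast, pv_pySetD_idx la C m _ halen hm,
      pv_pySetD_idx pb C m q hblen hm, ← hcdef]
    have hcol' : ∀ j, j < C →
        (la.set c ((pvCol (board.drop q) c).reverse)).getD j []
          = (pvCol (board.drop ((pb.set c q).getD j 0)) j).reverse := by
      intro j hj
      by_cases hjc : j = c
      · subst hjc
        rw [List.getD_eq_getElem?_getD, List.getElem?_set_self (by omega), Option.getD_some,
          List.getD_eq_getElem?_getD, List.getElem?_set_self (by omega), Option.getD_some]
      · have h1 : (la.set c ((pvCol (board.drop q) c).reverse)).getD j [] = la.getD j [] := by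
          rw [List.getD_eq_getElem?_getD, List.getElem?_set_ne (by omega),
            ← List.getD_eq_getElem?_getD]
        have h2 : (pb.set c q).getD j 0 = pb.getD j 0 := by
          rw [List.getD_eq_getElem?_getD, List.getElem?_set_ne (by omega),
            ← List.getD_eq_getElem?_getD]
        rw [h1, h2]
        exact hcol j hj
    by_cases hbe : ba = []
    · rw [if_pos hbe, if_neg (by simp [hbe])]
      exact ⟨rfl, rfl, by simpa using halen, by simpa using hblen, hcol'⟩
    · have hlast : PySem.List.pyGetD ba (-1) 0 = ba.getLastD 0 := by
        rw [PySem.List.pyGetD_neg_one ba 0 hbe, List.getLastD_eq_getLast?,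
          List.getLast?_eq_some_getLast hbe]
        rfl
      rw [if_neg hbe, hlast]
      by_cases hv : ba.getLastD 0 = v
      · rw [if_pos hv, if_pos ⟨hbe, hv⟩]
        exact ⟨rfl, rfl, by simpa using halen, by simpa using hblen, hcol'⟩
      · rw [if_neg hv, if_neg (fun h => hv h.2)]
        exact ⟨rfl, rfl, by simpa using halen, by simpa using hblen, hcol'⟩

-- the whole move loop preserves the invariant
theorem pv_fold_inv (board : List (List Int)) (C : Nat)
    (hrows : ∀ row ∈ board, C ≤ row.length) :
    ∀ (moves : List Int) (a : Int × List (List Int) × List Int) (b : Int × List Nat × List Int),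
      (∀ m ∈ moves, 1 - (C : Int) ≤ m ∧ m ≤ (C : Int)) →
      ((∀ row ∈ board, row.length = C) ∨ (∀ m ∈ moves, 1 ≤ m)) →
      pvInv board C a b →
      pvInv board C (moves.foldl pvA_step a) (moves.foldl (pvB_step board) b) := by
  intro moves
  induction moves with
  | nil => intro a b _ _ hinv; simpa using hinv
  | cons m rest ih =>
    intro a b hmv hdisj hinv
    have hm := hmv m (List.mem_cons_self)
    have hrget : ∀ row ∈ board,
        PySem.List.pyGetD row (m - 1) 0 = row.getD (PySem.Int.mod (m - 1) (C : Int)).toNat 0 := by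
      intro row hrow
      apply pv_row_get row C m hm
      rcases hdisj with h | h
      · exact Or.inl (h row hrow)
      · exact Or.inr ⟨h m (List.mem_cons_self), hrows row hrow⟩
    have hdisj' : (∀ row ∈ board, row.length = C) ∨ (∀ x ∈ rest, 1 ≤ x) := by
      rcases hdisj with h | h
      · exact Or.inl h
      · exact Or.inr (fun x hx => h x (List.mem_cons_of_mem m hx))
    rw [List.foldl_cons, List.foldl_cons]
    exact ih _ _ (fun x hx => hmv x (List.mem_cons_of_mem m hx)) hdisj'
      (pv_step_inv board C m hm hrget a b hinv)

-- ===== VERDICT (by name: the statement is the Claim_ definition above) =====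
theorem solution_13_spec : Claim_equal_solution_13 := by
  intro board moves _ hpre
  obtain ⟨hb, hrows, hmv, hdisj⟩ := hpre
  unfold Spec_solution_13 solution_13 solution_13_alt
  have hspec := pvA_lanes_spec board hb hrows
  have hinv : pvInv board (board.headD []).length
      (0, pvA_lanes board, []) (0, List.replicate (board.headD []).length 0, []) := by
    refine ⟨rfl, rfl, hspec.1, by simp, ?_⟩
    intro j hj
    have : (List.replicate (board.headD []).length (0 : Nat)).getD j 0 = 0 := by
      simp only [List.getD_eq_getElem?_getD, List.getElem?_replicate]
      rw [if_pos (by simpa [List.headD_eq_head?_getD] using hj)]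
      rfl
    rw [this, List.drop_zero]
    exact hspec.2 j hj
  exact (pv_fold_inv board _ hrows moves _ _ hmv hdisj hinv).1
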